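-- pv_equiv track=rewrite | github.com/AnurupaK/Diabetes_Prediction_Web_App | modules/Digits.py | checkDigits
-- ===== SOURCE A (Python) =====
-- def checkDigits(number_list):
--     digit_check = True
--     if number_list == []:
--         return False
--     else:
--         for number in number_list:
--             if(number is not None and number>=0):
--                 if (number >= 0 and number <= 9):
--                     digit_check = True
--                 elif (number >= 10 and number <= 99):
--                     digit_check = True
--                 elif (number >= 100 and number <= 999):
--                     digit_check = True
--                 else :
--                     digit_check = False
--                     break
--
--     if digit_check==True:
--         return True
--     else:
--         return False
-- ===== SOURCE B (Python) =====
-- def checkDigits(number_list):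
--     if number_list == []:
--         return False
--     return max((n for n in number_list if n is not None and n >= 0), default=0) <= 999
-- ===== Notes on version B (the rewrite author's own statement) =====
-- stated objective: simpler
-- what changed: Replaces the flag-and-break loop with three interval branches by a single aggregate: the maximum of the non-None, non-negative elements must be at most 999.
import Mathlib
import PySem

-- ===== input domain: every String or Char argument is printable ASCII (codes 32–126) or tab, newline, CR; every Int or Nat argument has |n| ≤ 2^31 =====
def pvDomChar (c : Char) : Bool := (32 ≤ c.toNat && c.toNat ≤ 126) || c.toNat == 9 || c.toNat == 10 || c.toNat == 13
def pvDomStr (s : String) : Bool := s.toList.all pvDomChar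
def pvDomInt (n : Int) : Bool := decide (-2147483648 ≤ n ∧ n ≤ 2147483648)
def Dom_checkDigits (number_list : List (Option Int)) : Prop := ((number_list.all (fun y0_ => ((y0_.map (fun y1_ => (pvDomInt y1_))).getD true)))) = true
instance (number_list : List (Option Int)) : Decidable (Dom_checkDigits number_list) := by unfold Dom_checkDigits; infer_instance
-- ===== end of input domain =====

-- B replaces A's flag-and-break loop over three interval branches by one aggregate check
-- (maximum of the gated elements ≤ 999); objective: simpler, same cost.

-- ===== PORT A =====
-- the for-loop with `digit_check` flag and `break`: recursion returns the flag's final value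
def checkDigitsLoop : List (Option Int) → Bool
  | [] => true
  | number :: rest =>
    match number with
    | none => checkDigitsLoop rest
    | some n =>
      if n ≥ 0 then
        if n ≥ 0 ∧ n ≤ 9 then checkDigitsLoop rest
        else if n ≥ 10 ∧ n ≤ 99 then checkDigitsLoop rest
        else if n ≥ 100 ∧ n ≤ 999 then checkDigitsLoop rest
        else false  -- digit_check = False; break
      else checkDigitsLoop rest

def checkDigits (number_list : List (Option Int)) : Bool :=
  if number_list = [] then false
  else
    let digit_check := checkDigitsLoop number_list
    if digit_check = true then true else false

-- ===== PORT B =====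
-- max((n for n in number_list if n is not None and n >= 0), default=0)
def gatedMax (number_list : List (Option Int)) : Int :=
  number_list.foldl
    (fun m x => match x with
      | some n => if n ≥ 0 then max m n else m
      | none => m) 0

def checkDigits_alt (number_list : List (Option Int)) : Bool :=
  if number_list = [] then false
  else decide (gatedMax number_list ≤ 999)

-- ===== PRECONDITION & SPEC =====
def Spec_checkDigits (number_list : List (Option Int)) (out : Bool) : Prop := out = checkDigits_alt number_list
instance (number_list : List (Option Int)) (out : Bool) : Decidable (Spec_checkDigits number_list out) := by unfold Spec_checkDigits; infer_instance

-- ===== CLAIM (what is proved, stated in full; the proofs are below) =====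
def Claim_equal_checkDigits : Prop := ∀ (number_list : List (Option Int)), Dom_checkDigits number_list → Spec_checkDigits number_list (checkDigits number_list)

-- ===== LEMMAS AND PROOFS =====

-- an element is acceptable to A iff it is None, negative, or ≤ 999
def okElem : Option Int → Bool
  | none => true
  | some n => decide (n < 0 ∨ n ≤ 999)

theorem checkDigitsLoop_eq_all (l : List (Option Int)) :
    checkDigitsLoop l = l.all okElem := by
  induction l with
  | nil => rfl
  | cons x rest ih =>
    cases x with
    | none => simp [checkDigitsLoop, okElem, ih]
    | some n =>
      simp only [checkDigitsLoop, List.all_cons, okElem]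
      split_ifs with h1 h2 h3 h4 <;> simp [ih] <;> omega

theorem gatedMax_le (l : List (Option Int)) (m : Int) :
    (l.foldl (fun m x => match x with
      | some n => if n ≥ 0 then max m n else m
      | none => m) m ≤ 999) ↔ (m ≤ 999 ∧ l.all okElem = true) := by
  induction l generalizing m with
  | nil => simp
  | cons x rest ih =>
    cases x with
    | none => simp [List.foldl_cons, okElem, ih]
    | some n =>
      simp only [List.foldl_cons, List.all_cons, okElem, ih]
      by_cases h : n ≥ 0
      · simp only [if_pos h, max_le_iff, Bool.and_eq_true, decide_eq_true_eq]
        constructor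
        · rintro ⟨⟨h1, h2⟩, h3⟩; exact ⟨h1, Or.inr h2, h3⟩
        · rintro ⟨h1, h2, h3⟩; exact ⟨⟨h1, by omega⟩, h3⟩
      · simp only [if_neg h, Bool.and_eq_true, decide_eq_true_eq]
        constructor
        · rintro ⟨h1, h2⟩; exact ⟨h1, Or.inl (by omega), h2⟩
        · rintro ⟨h1, _, h2⟩; exact ⟨h1, h2⟩

-- ===== VERDICT (by name: the statement is the Claim_ definition above) =====
theorem checkDigits_spec : Claim_equal_checkDigits := by
  intro l _
  unfold Spec_checkDigits checkDigits checkDigits_alt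
  by_cases h : l = []
  · simp [h]
  · simp only [h, if_false]
    have := gatedMax_le l 0
    simp only [gatedMax]
    rw [checkDigitsLoop_eq_all]
    by_cases hall : l.all okElem = true
    · simp [hall, this.mpr ⟨by omega, hall⟩]
    · simp only [hall]
      have : ¬ (l.foldl (fun m x => match x with
        | some n => if n ≥ 0 then max m n else m
        | none => m) 0 ≤ 999) := by
        intro hc; exact hall (gatedMax_le l 0 |>.mp hc).2
      simp [this]
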